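-- pv_equiv track=rewrite | github.com/Izya12/noc | core/script/base.py | expand_rangelist
-- ===== SOURCE A (Python) =====
-- def expand_rangelist(s):
--     """
--     Expand expressions like "1,2,5-7" to [1, 2, 5, 6, 7]
--     """
--     result = {}
--     for x in s.split(","):
--         x = x.strip()
--         if x == "":
--             continue
--         if "-" in x:
--             l, r = [int(y) for y in x.split("-")]
--             if l > r:
--                 x = r
--                 r = l
--                 l = x
--             for i in range(l, r + 1):
--                 result[i] = None
--         else:
--             result[int(x)] = None
--     return sorted(result.keys())
-- ===== SOURCE B (Python) =====
-- def expand_rangelist(s):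
--     """
--     Expand expressions like "1,2,5-7" to [1, 2, 5, 6, 7]
--     """
--     # parse tokens into (lo, hi) interval pairs
--     pairs = []
--     for tok in s.split(","):
--         tok = tok.strip()
--         if tok == "":
--             continue
--         if "-" in tok:
--             a, b = [int(y) for y in tok.split("-")]
--             if a > b:
--                 a, b = b, a
--         else:
--             a = b = int(tok)
--         pairs.append((a, b))
--     # sort by start, merge overlapping/touching intervals
--     pairs.sort(key=lambda p: p[0])
--     merged = []
--     cur = None
--     for a, b in pairs:
--         if cur is None:
--             cur = (a, b)
--         elif a <= cur[1] + 1: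
--             cur = (cur[0], max(cur[1], b))
--         else:
--             merged.append(cur)
--             cur = (a, b)
--     if cur is not None:
--         merged.append(cur)
--     # expand the disjoint sorted intervals: already sorted and duplicate-free
--     result = []
--     for a, b in merged:
--         result.extend(range(a, b + 1))
--     return result
-- ===== Notes on version B (the rewrite author's own statement) =====
-- stated objective: alternative
-- what changed: A inserts every expanded integer into a dict and sorts all of them at the end; B parses tokens into (lo,hi) interval pairs, sorts only the few pairs by start, merges overlapping/touching intervals, and expands the disjoint merged intervals, emitting the output already sorted and duplicate-free.
import Mathlib
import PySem

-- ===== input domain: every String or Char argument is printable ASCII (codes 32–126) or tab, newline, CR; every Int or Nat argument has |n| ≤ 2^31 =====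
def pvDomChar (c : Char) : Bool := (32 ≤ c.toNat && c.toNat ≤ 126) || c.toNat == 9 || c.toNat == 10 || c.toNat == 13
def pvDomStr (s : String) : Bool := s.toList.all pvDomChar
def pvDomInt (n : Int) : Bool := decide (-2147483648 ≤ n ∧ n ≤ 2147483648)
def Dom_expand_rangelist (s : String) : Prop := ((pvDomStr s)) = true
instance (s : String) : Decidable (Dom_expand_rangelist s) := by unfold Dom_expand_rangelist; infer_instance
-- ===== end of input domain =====

-- B replaces A's per-integer dict insertion + final sort by interval parsing, a sort of the
-- few (lo,hi) pairs, merging of overlapping/touching intervals, and expansion of the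
-- disjoint sorted intervals (already sorted and duplicate-free).

-- ===== PORT A =====
-- one token of A's loop body: update the dict (none = the Python raises: ValueError on int(),
-- or unpacking a "-"-split that does not have exactly two parts)
def pvA_tok (d : PySem.Dict Int Unit) (x : String) : Option (PySem.Dict Int Unit) :=
  let x := PySem.Str.strip x
  if x = "" then some d
  else if PySem.Str.isIn "-" x then
    match ((PySem.Str.split? x "-").getD []).mapM PySem.Int.ofStr? with
    | some [l, r] =>
        let lr := if l > r then (r, l) else (l, r)
        some ((PySem.List.pyRange lr.1 (lr.2 + 1)).foldl (fun d i => d.insert i ()) d)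
    | _ => none
  else
    match PySem.Int.ofStr? x with
    | some n => some (d.insert n ())
    | none => none

def pvA_loop : List String → PySem.Dict Int Unit → Option (PySem.Dict Int Unit)
  | [], d => some d
  | x :: xs, d =>
    match pvA_tok d x with
    | some d' => pvA_loop xs d'
    | none => none

def expand_rangelist (s : String) : List Int :=
  match pvA_loop ((PySem.Str.split? s ",").getD []) PySem.Dict.empty with
  | some d => PySem.List.sorted d.keys (fun x => x) false
  | none => []

-- ===== PORT B =====
-- parse the comma-separated tokens into (lo, hi) pairs (none = the Python raises)
def pvB_parse : List String → Option (List (Int × Int))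
  | [] => some []
  | x :: xs =>
    let t := PySem.Str.strip x
    if t = "" then pvB_parse xs
    else
      let p? : Option (Int × Int) :=
        if PySem.Str.isIn "-" t then
          match ((PySem.Str.split? t "-").getD []).mapM PySem.Int.ofStr? with
          | some [a, b] => some (if a > b then (b, a) else (a, b))
          | _ => none
        else (PySem.Int.ofStr? t).map (fun n => (n, n))
      match p?, pvB_parse xs with
      | some p, some ps => some (p :: ps)
      | _, _ => none

-- the merge loop: `cur` is the interval being grown, emitted when the next pair starts
-- beyond cur.2 + 1
def pvB_mergeGo (a b : Int) : List (Int × Int) → List (Int × Int)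
  | [] => [(a, b)]
  | (c, d) :: ps => if c ≤ b + 1 then pvB_mergeGo a (max b d) ps else (a, b) :: pvB_mergeGo c d ps

def pvB_merge : List (Int × Int) → List (Int × Int)
  | [] => []
  | p :: ps => pvB_mergeGo p.1 p.2 ps

def expand_rangelist_alt (s : String) : List Int :=
  match pvB_parse ((PySem.Str.split? s ",").getD []) with
  | none => []
  | some ps =>
    let merged := pvB_merge (PySem.List.sorted ps (fun p => p.1) false)
    merged.foldl (fun acc p => acc ++ PySem.List.pyRange p.1 (p.2 + 1)) []

-- ===== PRECONDITION & SPEC =====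
-- a token is admissible iff (after strip) it is empty, or an int literal without "-",
-- or splits on "-" into exactly two int literals — exactly where the Python A returns
-- (elsewhere int()/tuple unpacking raises ValueError; B raises there too)
def pvTokOK (x : String) : Bool :=
  let t := PySem.Str.strip x
  if t = "" then true
  else if PySem.Str.isIn "-" t then
    match ((PySem.Str.split? t "-").getD []).mapM PySem.Int.ofStr? with
    | some [_, _] => true
    | _ => false
  else (PySem.Int.ofStr? t).isSome

def Pre_expand_rangelist (s : String) : Prop :=
  (((PySem.Str.split? s ",").getD []).all pvTokOK) = true
instance (s : String) : Decidable (Pre_expand_rangelist s) := by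
  unfold Pre_expand_rangelist; infer_instance

def pvWitness_expand_rangelist : String := "1,2,5-7"

def Spec_expand_rangelist (s : String) (out : List Int) : Prop := out = expand_rangelist_alt s
instance (s : String) (out : List Int) : Decidable (Spec_expand_rangelist s out) := by
  unfold Spec_expand_rangelist; infer_instance

-- ===== CLAIM (what is proved, stated in full; the proofs are below) =====
def Claim_equal_expand_rangelist : Prop := ∀ (s : String), Dom_expand_rangelist s → Pre_expand_rangelist s → Spec_expand_rangelist s (expand_rangelist s)

-- ===== LEMMAS AND PROOFS =====

-- the expansion of a list of interval pairs
def pvExp (l : List (Int × Int)) : List Int :=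
  l.flatMap (fun p => PySem.List.pyRange p.1 (p.2 + 1))

lemma pvB_parse_isSome (toks : List String) (h : ∀ x ∈ toks, pvTokOK x = true) :
    ∃ ps, pvB_parse toks = some ps := by
  induction toks with
  | nil => exact ⟨[], rfl⟩
  | cons x xs ih =>
    obtain ⟨ps, hps⟩ := ih (fun y hy => h y (List.mem_cons_of_mem _ hy))
    have hx := h x (List.mem_cons_self)
    simp only [pvTokOK] at hx
    simp only [pvB_parse]
    split
    · exact ⟨ps, hps⟩
    · next ht =>
      rw [if_neg ht] at hx
      split at hx
      · next hin =>
        rw [if_pos hin]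
        match hm : ((PySem.Str.split? (PySem.Str.strip x) "-").getD []).mapM PySem.Int.ofStr? with
        | some [a, b] => exact ⟨(if a > b then (b, a) else (a, b)) :: ps, by simp [hps]⟩
        | none => rw [hm] at hx; simp at hx
        | some [] => rw [hm] at hx; simp at hx
        | some [_] => rw [hm] at hx; simp at hx
        | some (_ :: _ :: _ :: _) => rw [hm] at hx; simp at hx
      · next hin =>
        rw [if_neg hin]
        match hm : PySem.Int.ofStr? (PySem.Str.strip x) with
        | some n => exact ⟨(n, n) :: ps, by simp [hps]⟩
        | none => rw [hm] at hx; simp at hx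

lemma pvB_parse_wf (toks : List String) (ps : List (Int × Int))
    (h : pvB_parse toks = some ps) : ∀ p ∈ ps, p.1 ≤ p.2 := by
  induction toks generalizing ps with
  | nil => simp only [pvB_parse, Option.some.injEq] at h; subst h; simp
  | cons x xs ih =>
    simp only [pvB_parse] at h
    split at h
    · exact ih ps h
    · split at h
      case _ p ps' hp hps' =>
        injection h with h; subst h
        intro q hq
        rcases List.mem_cons.mp hq with rfl | hq
        · split at hp
          · split at hp
            case _ a b _ =>
              injection hp with hp; subst hp
              by_cases hab : a > b <;> simp [hab] <;> omega
            case _ => exact absurd hp (by simp)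
          · obtain ⟨n, -, rfl⟩ := Option.map_eq_some_iff.mp hp
            exact le_refl _
        · exact ih ps' hps' q hq
      case _ => exact absurd h (by simp)

-- A's dict loop succeeds exactly when B's parse does, and its keys are B's pairs expanded
set_option maxHeartbeats 1000000 in
lemma pvA_loop_keys (toks : List String) (ps : List (Int × Int)) (d : PySem.Dict Int Unit)
    (h : pvB_parse toks = some ps) :
    ∃ d', pvA_loop toks d = some d' ∧ d'.keys = PySem.Set.update d.keys (pvExp ps) := by
  induction toks generalizing ps d with
  | nil =>
    simp only [pvB_parse, Option.some.injEq] at h; subst h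
    exact ⟨d, rfl, by simp only [pvExp, List.flatMap_nil]; rfl⟩
  | cons x xs ih =>
    simp only [pvB_parse] at h
    simp only [pvA_loop, pvA_tok]
    split at h
    · next ht => rw [if_pos ht]; exact ih ps d h
    · next ht =>
      rw [if_neg ht]
      by_cases hin : PySem.Str.isIn "-" (PySem.Str.strip x) = true
      · rw [if_pos hin] at h ⊢
        match hm : ((PySem.Str.split? (PySem.Str.strip x) "-").getD []).mapM PySem.Int.ofStr? with
        | some [a, b] =>
          rw [hm] at h
          match hq : pvB_parse xs with
          | some ps' =>
            rw [hq] at h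
            injection h with h; subst h
            obtain ⟨d', hd', hk⟩ := ih ps'
              ((PySem.List.pyRange (if a > b then (b, a) else (a, b)).1
                ((if a > b then (b, a) else (a, b)).2 + 1)).foldl (fun d i => d.insert i ()) d) hq
            refine ⟨d', hd', ?_⟩
            rw [hk, PySem.Dict.keys_foldl_insert _ (fun _ _ => ()) d]
            simp only [pvExp, List.flatMap_cons, ← PySem.Set.update_append]
          | none => rw [hq] at h; exact absurd h (by simp)
        | none => rw [hm] at h; exact absurd h (by simp)
        | some [] => rw [hm] at h; exact absurd h (by simp)
        | some [_] => rw [hm] at h; exact absurd h (by simp)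
        | some (_ :: _ :: _ :: _) => rw [hm] at h; exact absurd h (by simp)
      · rw [if_neg hin] at h ⊢
        match hm : PySem.Int.ofStr? (PySem.Str.strip x) with
        | some n =>
          rw [hm] at h
          match hq : pvB_parse xs with
          | some ps' =>
            rw [hq] at h
            injection h with h; subst h
            obtain ⟨d', hd', hk⟩ := ih ps' (d.insert n ()) hq
            refine ⟨d', hd', ?_⟩
            rw [hk]
            have hins : (d.insert n ()).keys = PySem.Set.update d.keys [n] := by
              have := PySem.Dict.keys_foldl_insert [n] (fun _ _ => ()) d
              simpa using this
            rw [hins, ← PySem.Set.update_append]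
            have hsingle : pvExp ((n, n) :: ps') = [n] ++ pvExp ps' := by
              simp [pvExp, PySem.List.pyRange_one_singleton]
            rw [hsingle]
          | none => rw [hq] at h; exact absurd h (by simp)
        | none => rw [hm] at h; exact absurd h (by simp)

lemma mem_pvExp (l : List (Int × Int)) (x : Int) :
    x ∈ pvExp l ↔ ∃ p ∈ l, p.1 ≤ x ∧ x ≤ p.2 := by
  simp [pvExp, List.mem_flatMap, PySem.List.mem_pyRange_one]

-- the merge loop yields a strictly increasing expansion covering exactly the union
lemma pvB_mergeGo_spec (ps : List (Int × Int)) : ∀ (a b : Int), a ≤ b →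
    (∀ p ∈ ps, a ≤ p.1 ∧ p.1 ≤ p.2) → ps.Pairwise (fun p q => p.1 ≤ q.1) →
    (pvExp (pvB_mergeGo a b ps)).Pairwise (· < ·) ∧
    ∀ x, x ∈ pvExp (pvB_mergeGo a b ps) ↔ (a ≤ x ∧ x ≤ b) ∨ ∃ p ∈ ps, p.1 ≤ x ∧ x ≤ p.2 := by
  induction ps with
  | nil =>
    intro a b hab _ _
    constructor
    · simpa [pvExp, pvB_mergeGo] using PySem.List.pairwise_lt_pyRange_one a (b + 1)
    · intro x
      simp [pvExp, pvB_mergeGo, PySem.List.mem_pyRange_one]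
  | cons q qs ih =>
    obtain ⟨c, d⟩ := q
    intro a b hab hps hsort
    have hc := hps (c, d) List.mem_cons_self
    have hqs : ∀ p ∈ qs, p.1 ≤ p.2 := fun p hp => (hps p (List.mem_cons_of_mem _ hp)).2
    have hhd := (List.pairwise_cons.mp hsort).1
    have htl := (List.pairwise_cons.mp hsort).2
    simp only [pvB_mergeGo]
    by_cases hcb : c ≤ b + 1
    · rw [if_pos hcb]
      obtain ⟨hpw, hmem⟩ := ih a (max b d) (le_trans hab (le_max_left b d))
        (fun p hp => ⟨(hps p (List.mem_cons_of_mem _ hp)).1, hqs p hp⟩) htl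
      refine ⟨hpw, fun x => ?_⟩
      rw [hmem x]
      constructor
      · rintro (⟨h1, h2⟩ | ⟨p, hp, hx⟩)
        · obtain hm | hm := max_choice b d <;> rw [hm] at h2
          · exact Or.inl ⟨h1, h2⟩
          · rcases le_or_gt x b with hb | hb
            · exact Or.inl ⟨h1, hb⟩
            · exact Or.inr ⟨(c, d), List.mem_cons_self, by omega, h2⟩
        · exact Or.inr ⟨p, List.mem_cons_of_mem _ hp, hx⟩
      · rintro (⟨h1, h2⟩ | ⟨p, hp, hx⟩)
        · exact Or.inl ⟨h1, le_trans h2 (le_max_left b d)⟩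
        · rcases List.mem_cons.mp hp with heq | hp
          · subst heq
            exact Or.inl ⟨le_trans hc.1 hx.1, le_trans hx.2 (le_max_right b d)⟩
          · exact Or.inr ⟨p, hp, hx⟩
    · rw [if_neg hcb]
      obtain ⟨hpw, hmem⟩ := ih c d hc.2 (fun p hp => ⟨hhd p hp, hqs p hp⟩) htl
      have hexp : pvExp ((a, b) :: pvB_mergeGo c d qs)
          = PySem.List.pyRange a (b + 1) ++ pvExp (pvB_mergeGo c d qs) := by
        simp [pvExp]
      constructor
      · rw [hexp]
        refine List.pairwise_append.mpr ⟨?_, hpw, ?_⟩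
        · exact PySem.List.pairwise_lt_pyRange_one a (b + 1)
        · intro u hu v hv
          have hu' := (PySem.List.mem_pyRange_one.mp hu).2
          have hv' := (hmem v).mp hv
          rcases hv' with ⟨h1, _⟩ | ⟨p, hp, h1, _⟩
          · omega
          · have := hhd p hp
            omega
      · intro x
        rw [hexp]
        simp only [List.mem_append, PySem.List.mem_pyRange_one, Int.lt_add_one_iff, hmem x,
          List.mem_cons]
        constructor
        · rintro (h | ⟨h1, h2⟩ | ⟨p, hp, hx⟩)
          · exact Or.inl h
          · exact Or.inr ⟨(c, d), Or.inl rfl, h1, h2⟩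
          · exact Or.inr ⟨p, Or.inr hp, hx⟩
        · rintro (h | ⟨p, hp, hx⟩)
          · exact Or.inl h
          · rcases hp with heq | hp
            · subst heq; exact Or.inr (Or.inl hx)
            · exact Or.inr (Or.inr ⟨p, hp, hx⟩)

-- sort + merge + expand: strictly increasing, covering exactly the union of the pairs
lemma pvB_merge_spec (ps : List (Int × Int)) (hwf : ∀ p ∈ ps, p.1 ≤ p.2) :
    (pvExp (pvB_merge (PySem.List.sorted ps (fun p => p.1) false))).Pairwise (· < ·) ∧
    ∀ x, x ∈ pvExp (pvB_merge (PySem.List.sorted ps (fun p => p.1) false)) ↔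
      ∃ p ∈ ps, p.1 ≤ x ∧ x ≤ p.2 := by
  match hs : PySem.List.sorted ps (fun p => p.1) false with
  | [] =>
    have : ps = [] := (PySem.List.sorted_eq_nil_iff ps (fun p => p.1) false).mp hs
    subst this
    simp [pvB_merge, pvExp]
  | q :: qs =>
    have hpair := PySem.List.sorted_pairwise ps (fun p => p.1)
    rw [hs] at hpair
    have hmemall : ∀ p ∈ q :: qs, p ∈ ps := by
      intro p hp
      rw [← hs] at hp
      exact (PySem.List.mem_sorted ps (fun p => p.1) false p).mp hp
    have hq := hwf q (hmemall q List.mem_cons_self)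
    obtain ⟨hpw, hmem⟩ := pvB_mergeGo_spec qs q.1 q.2 hq
      (fun p hp => ⟨(List.pairwise_cons.mp hpair).1 p hp,
        hwf p (hmemall p (List.mem_cons_of_mem _ hp))⟩)
      (List.pairwise_cons.mp hpair).2
    simp only [pvB_merge]
    refine ⟨hpw, fun x => ?_⟩
    rw [hmem x]
    constructor
    · rintro (h | ⟨p, hp, hx⟩)
      · exact ⟨q, hmemall q List.mem_cons_self, h⟩
      · exact ⟨p, hmemall p (List.mem_cons_of_mem _ hp), hx⟩
    · rintro ⟨p, hp, hx⟩
      rw [← PySem.List.mem_sorted ps (fun p => p.1) false p, hs] at hp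
      rcases List.mem_cons.mp hp with heq | hp
      · subst heq; exact Or.inl hx
      · exact Or.inr ⟨p, hp, hx⟩

-- ===== VERDICT (by name: the statement is the Claim_ definition above) =====
theorem expand_rangelist_spec : Claim_equal_expand_rangelist := by
  intro s _hdom hpre
  unfold Spec_expand_rangelist
  unfold Pre_expand_rangelist at hpre
  obtain ⟨ps, hps⟩ := pvB_parse_isSome ((PySem.Str.split? s ",").getD [])
    (fun x hx => List.all_eq_true.mp hpre x hx)
  obtain ⟨d', hd', hk⟩ := pvA_loop_keys ((PySem.Str.split? s ",").getD []) ps PySem.Dict.empty hps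
  have hwf := pvB_parse_wf ((PySem.Str.split? s ",").getD []) ps hps
  obtain ⟨hpw, hmem⟩ := pvB_merge_spec ps hwf
  unfold expand_rangelist expand_rangelist_alt
  rw [hps, hd']
  dsimp only
  rw [PySem.List.foldl_append_eq_flatMap (fun p => PySem.List.pyRange p.1 (p.2 + 1))
    (pvB_merge (PySem.List.sorted ps (fun p => p.1) false)) []]
  show PySem.List.sorted d'.keys (fun x => x) false
      = pvExp (pvB_merge (PySem.List.sorted ps (fun p => p.1) false))
  have hkeys_nodup : d'.keys.Nodup := by
    rw [hk]
    exact PySem.Set.nodup_update _ _ (by simp [PySem.Dict.empty, PySem.Dict.keys])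
  have hE_nodup : (pvExp (pvB_merge (PySem.List.sorted ps (fun p => p.1) false))).Nodup :=
    hpw.imp ne_of_lt
  have hperm : (pvExp (pvB_merge (PySem.List.sorted ps (fun p => p.1) false))).Perm d'.keys := by
    refine (List.perm_ext_iff_of_nodup hE_nodup hkeys_nodup).mpr fun x => ?_
    rw [hmem x, hk]
    have : x ∈ PySem.Set.update (PySem.Dict.empty : PySem.Dict Int Unit).keys (pvExp ps) ↔ x ∈ pvExp ps := by
      rw [PySem.Set.mem_update]
      simp [PySem.Dict.empty, PySem.Dict.keys]
    rw [this, mem_pvExp]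
  exact PySem.List.sorted_eq_of_perm_of_pairwise_lt d'.keys _ (fun x => x) hperm hpw
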